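-- pv_equiv track=rewrite | github.com/zaidnere/sqli-project | backend/app/preprocessing/normalizer_backup_v17b.py | _detect_safe_placeholder_list
-- ===== SOURCE A (Python) =====
-- def _detect_safe_placeholder_list(tokens: list[str], eq_idx: int) -> bool:
--     """
--     Detect:
--       <var> = ",".join("?" for _ in <iter>)          # Python
--       <var> = ",".join(["?"] * len(<iter>))          # Python alt
--       const <var> = <iter>.map(() => "?").join(",")  # JavaScript
--
--     Strict: requires both a `.join(` call AND a `"?"` literal in the same
--     statement.
--     """
--     n = len(tokens)
--     i = eq_idx + 1
--     depth = 0
--     has_join = False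
--     has_qmark = False
--     stmt_boundary_kw = {
--         "def", "class", "return", "if", "elif", "else", "for", "while",
--         "try", "except", "finally", "with", "import", "from", "raise",
--         "yield", "pass", "break", "continue",
--     }
--     while i < n:
--         t = tokens[i]
--         if t in ("(", "[", "{"):
--             depth += 1
--         elif t in (")", "]", "}"):
--             depth -= 1
--             if depth < 0:
--                 break
--         if depth == 0:
--             if t in (";", "\n"):
--                 break
--             if t == "=" and i > eq_idx + 1:
--                 prev_t = tokens[i - 1] if i - 1 >= 0 else None
--                 next_t = tokens[i + 1] if i + 1 < n else None
--                 if prev_t not in ("=", "!", "<", ">", "+", "-", "*", "/", "%") and next_t != "=":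
--                     break
--             if t in stmt_boundary_kw:
--                 break
--         if t == "join":
--             if i > 0 and tokens[i - 1] == "." and i + 1 < n and tokens[i + 1] == "(":
--                 has_join = True
--         if t == "implode" and i + 1 < n and tokens[i + 1] == "(":
--             has_join = True
--         if t in ('"?"', "'?'"):
--             has_qmark = True
--         i += 1
--     return has_join and has_qmark
-- ===== SOURCE B (Python) =====
-- _OPEN = ("(", "[", "{")
-- _CLOSE = (")", "]", "}")
-- _BOUNDARY = frozenset({
--     "def", "class", "return", "if", "elif", "else", "for", "while",
--     "try", "except", "finally", "with", "import", "from", "raise",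
--     "yield", "pass", "break", "continue",
-- })
-- _CMP = ("=", "!", "<", ">", "+", "-", "*", "/", "%")
--
--
-- def _bracket_depths(tokens, start):
--     """Table [(i, tokens[i], depth-after-token-i) for i in range(start, len(tokens))]."""
--     rows = []
--     d = 0
--     for i in range(start, len(tokens)):
--         t = tokens[i]
--         if t in _OPEN:
--             d += 1
--         elif t in _CLOSE:
--             d -= 1
--         rows.append((i, t, d))
--     return rows
--
--
-- def _breaks_statement(tokens, i, start, t):
--     if t in (";", "\n") or t in _BOUNDARY:
--         return True
--     if t == "=" and i > start:
--         prev_t = tokens[i - 1] if i - 1 >= 0 else None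
--         next_t = tokens[i + 1] if i + 1 < len(tokens) else None
--         return prev_t not in _CMP and next_t != "="
--     return False
--
--
-- def _is_join_call(tokens, i, t):
--     n = len(tokens)
--     if t == "join":
--         return i > 0 and tokens[i - 1] == "." and i + 1 < n and tokens[i + 1] == "("
--     return t == "implode" and i + 1 < n and tokens[i + 1] == "("
--
--
-- def _detect_safe_placeholder_list(tokens: list[str], eq_idx: int) -> bool:
--     start = eq_idx + 1
--     stmt = []
--     for i, t, d in _bracket_depths(tokens, start):
--         if d < 0 or (d == 0 and _breaks_statement(tokens, i, start, t)):
--             break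
--         stmt.append((i, t))
--     return (any(_is_join_call(tokens, i, t) for i, t in stmt)
--             and any(t in ('"?"', "'?'") for _, t in stmt))
-- ===== Notes on version B (the rewrite author's own statement) =====
-- stated objective: alternative
-- what changed: A's single while-loop that interleaves depth tracking, break tests and flag mutation is replaced by a staged pipeline: first build a table of (index, token, bracket-depth) rows, then truncate that table at the first statement-boundary row, then run two independent any() predicate passes (join-call, placeholder literal) over the truncated table.
import Mathlib
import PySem

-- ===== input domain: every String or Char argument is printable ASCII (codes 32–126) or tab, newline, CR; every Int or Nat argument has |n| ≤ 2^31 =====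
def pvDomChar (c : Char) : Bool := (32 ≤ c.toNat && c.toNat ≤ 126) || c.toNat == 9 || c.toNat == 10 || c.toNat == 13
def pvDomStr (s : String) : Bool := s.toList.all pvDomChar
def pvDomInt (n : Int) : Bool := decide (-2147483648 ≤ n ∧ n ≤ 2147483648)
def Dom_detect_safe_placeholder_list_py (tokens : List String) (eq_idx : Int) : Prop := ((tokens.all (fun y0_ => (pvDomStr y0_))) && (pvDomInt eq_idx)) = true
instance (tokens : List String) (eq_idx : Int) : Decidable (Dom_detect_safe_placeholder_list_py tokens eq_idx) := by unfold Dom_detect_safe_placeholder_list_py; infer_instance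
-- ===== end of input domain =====

-- ===== PORT A =====
-- B replaces A's single flag-mutating while-loop by a staged pipeline (depth table →
-- truncate at the statement boundary → two predicate passes); same return value on Pre_.

def pyStmtKw : List String :=
  ["def", "class", "return", "if", "elif", "else", "for", "while",
   "try", "except", "finally", "with", "import", "from", "raise",
   "yield", "pass", "break", "continue"]

def pyCmpPrev : List String := ["=", "!", "<", ">", "+", "-", "*", "/", "%"]

-- the while-loop of A; fuel = number of remaining iterations (n - i)
def pyA_go (tokens : List String) (eq_idx : Int) :
    Nat → Int → Int → Bool → Bool → Bool
  | 0, _, _, hj, hq => hj && hq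
  | fuel+1, i, depth, hj, hq =>
    match PySem.List.pyGet? tokens i with
    | none => false   -- IndexError (outside Pre_)
    | some t =>
      let n : Int := tokens.length
      let depth1 : Int :=
        if t = "(" ∨ t = "[" ∨ t = "{" then depth + 1
        else if t = ")" ∨ t = "]" ∨ t = "}" then depth - 1
        else depth
      if (t = ")" ∨ t = "]" ∨ t = "}") ∧ depth1 < 0 then hj && hq
      else if depth1 = 0 ∧ (t = ";" ∨ t = "\n") then hj && hq
      else if depth1 = 0 ∧ t = "=" ∧ i > eq_idx + 1 ∧
              ¬ (0 ≤ i - 1 ∧ (PySem.List.pyGet? tokens (i - 1)).getD "" ∈ pyCmpPrev) ∧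
              ¬ (i + 1 < n ∧ PySem.List.pyGet? tokens (i + 1) = some "=") then hj && hq
      else if depth1 = 0 ∧ t ∈ pyStmtKw then hj && hq
      else
        let hj1 := hj || decide (t = "join" ∧ 0 < i ∧
          PySem.List.pyGet? tokens (i - 1) = some "." ∧ i + 1 < n ∧
          PySem.List.pyGet? tokens (i + 1) = some "(")
        let hj2 := hj1 || decide (t = "implode" ∧ i + 1 < n ∧
          PySem.List.pyGet? tokens (i + 1) = some "(")
        let hq1 := hq || decide (t = "\"?\"" ∨ t = "'?'")
        pyA_go tokens eq_idx fuel (i + 1) depth1 hj2 hq1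

def detect_safe_placeholder_list_py (tokens : List String) (eq_idx : Int) : Bool :=
  pyA_go tokens eq_idx (((tokens.length : Int) - (eq_idx + 1)).toNat) (eq_idx + 1) 0 false false

-- ===== PORT B =====
-- _bracket_depths: the table [(i, tokens[i], depth-after-token-i)]; fuel = remaining indices
def bracketDepths (tokens : List String) : Nat → Int → Int → List (Int × String × Int)
  | 0, _, _ => []
  | k+1, i, d =>
    let t := (PySem.List.pyGet? tokens i).getD ""   -- tokens[i]; in range under Pre_
    let d1 : Int := if t ∈ ["(", "[", "{"] then d + 1
                    else if t ∈ [")", "]", "}"] then d - 1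
                    else d
    (i, t, d1) :: bracketDepths tokens k (i + 1) d1

def breaksStatement (tokens : List String) (i start : Int) (t : String) : Bool :=
  if t = ";" ∨ t = "\n" ∨ t ∈ pyStmtKw then true
  else if t = "=" ∧ i > start then
    decide (¬ (0 ≤ i - 1 ∧ (PySem.List.pyGet? tokens (i - 1)).getD "" ∈ pyCmpPrev) ∧
            ¬ (i + 1 < (tokens.length : Int) ∧ PySem.List.pyGet? tokens (i + 1) = some "="))
  else false

def isJoinCall (tokens : List String) (i : Int) (t : String) : Bool :=
  if t = "join" then
    decide (0 < i ∧ PySem.List.pyGet? tokens (i - 1) = some "." ∧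
            i + 1 < (tokens.length : Int) ∧ PySem.List.pyGet? tokens (i + 1) = some "(")
  else
    t = "implode" && decide (i + 1 < (tokens.length : Int) ∧
                             PySem.List.pyGet? tokens (i + 1) = some "(")

-- the statement prefix: rows before the first boundary row
def takeStmt (tokens : List String) (start : Int) : List (Int × String × Int) → List (Int × String)
  | [] => []
  | (i, t, d) :: rest =>
    if d < 0 ∨ (d = 0 ∧ breaksStatement tokens i start t) then []
    else (i, t) :: takeStmt tokens start rest

def detect_safe_placeholder_list_py_alt (tokens : List String) (eq_idx : Int) : Bool :=
  let start := eq_idx + 1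
  let stmt := takeStmt tokens start
    (bracketDepths tokens ((tokens.length : Int) - start).toNat start 0)
  stmt.any (fun p => isJoinCall tokens p.1 p.2) &&
  stmt.any (fun p => p.2 = "\"?\"" || p.2 = "'?'")

-- ===== PRECONDITION & SPEC =====
-- Pre_ excludes exactly the inputs on which A raises IndexError (first tokens[i]
-- access with i = eq_idx+1 below -len(tokens)); A returns normally everywhere else,
-- including Python's negative-index wraparound region, which stays inside Pre_.
def Pre_detect_safe_placeholder_list_py (tokens : List String) (eq_idx : Int) : Prop :=
  -(tokens.length : Int) ≤ eq_idx + 1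
instance (tokens : List String) (eq_idx : Int) : Decidable (Pre_detect_safe_placeholder_list_py tokens eq_idx) := by unfold Pre_detect_safe_placeholder_list_py; infer_instance

def pvWitness_detect_safe_placeholder_list_py : List String × Int :=
  (["x", "=", ",", ".", "join", "(", "\"?\"", ")"], 1)

def Spec_detect_safe_placeholder_list_py (tokens : List String) (eq_idx : Int) (out : Bool) : Prop := out = detect_safe_placeholder_list_py_alt tokens eq_idx
instance (tokens : List String) (eq_idx : Int) (out : Bool) : Decidable (Spec_detect_safe_placeholder_list_py tokens eq_idx out) := by unfold Spec_detect_safe_placeholder_list_py; infer_instance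

-- ===== CLAIM (what is proved, stated in full; the proofs are below) =====
def Claim_equal_detect_safe_placeholder_list_py : Prop := ∀ (tokens : List String) (eq_idx : Int), Dom_detect_safe_placeholder_list_py tokens eq_idx → Pre_detect_safe_placeholder_list_py tokens eq_idx → Spec_detect_safe_placeholder_list_py tokens eq_idx (detect_safe_placeholder_list_py tokens eq_idx)

-- ===== LEMMAS AND PROOFS =====

lemma breaksStatement_iff (tokens : List String) (i start : Int) (t : String) :
    breaksStatement tokens i start t = true ↔
      ((t = ";" ∨ t = "\n") ∨
       (t = "=" ∧ i > start ∧
          ¬ (0 ≤ i - 1 ∧ (PySem.List.pyGet? tokens (i - 1)).getD "" ∈ pyCmpPrev) ∧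
          ¬ (i + 1 < (tokens.length : Int) ∧ PySem.List.pyGet? tokens (i + 1) = some "=")) ∨
       t ∈ pyStmtKw) := by
  unfold breaksStatement
  split_ifs with h1 h2
  · simp only [true_iff]
    tauto
  · simp only [decide_eq_true_eq]
    constructor
    · intro h; exact Or.inr (Or.inl ⟨h2.1, h2.2, h.1, h.2⟩)
    · rintro ((h | h) | ⟨_, _, hp, hn⟩ | h) <;> first | exact ⟨hp, hn⟩ | exact absurd (by tauto) h1
  · simp only [false_iff]
    rintro ((h | h) | ⟨he, hg, _⟩ | h) <;> first | exact h2 ⟨he, hg⟩ | exact h1 (by tauto)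

lemma pyA_go_eq (tokens : List String) (eq_idx : Int) :
    ∀ (k : Nat) (i depth : Int) (hj hq : Bool),
      -(tokens.length : Int) ≤ i →
      i + k = (tokens.length : Int) →
      0 ≤ depth →
      pyA_go tokens eq_idx k i depth hj hq =
        ((hj || (takeStmt tokens (eq_idx + 1) (bracketDepths tokens k i depth)).any
            (fun p => isJoinCall tokens p.1 p.2)) &&
         (hq || (takeStmt tokens (eq_idx + 1) (bracketDepths tokens k i depth)).any
            (fun p => p.2 = "\"?\"" || p.2 = "'?'"))) := by
  intro k
  induction k with
  | zero =>
    intro i depth hj hq _ _ _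
    simp [pyA_go, bracketDepths, takeStmt]
  | succ k ih =>
    intro i depth hj hq hlo hlen hd
    have hilt : i < (tokens.length : Int) := by omega
    have hsome : PySem.List.pyGet? tokens i ≠ none := by
      rw [Ne, PySem.List.pyGet?_eq_none_iff]
      simp only [PySem.Raise.InRange]
      omega
    cases ht : PySem.List.pyGet? tokens i with
    | none => exact absurd ht hsome
    | some t =>
      simp only [pyA_go, bracketDepths, ht, Option.getD_some]
      have hdelta : (if t ∈ ["(", "[", "{"] then depth + 1
          else if t ∈ [")", "]", "}"] then depth - 1 else depth) =
          (if t = "(" ∨ t = "[" ∨ t = "{" then depth + 1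
          else if t = ")" ∨ t = "]" ∨ t = "}" then depth - 1 else depth) := by
        simp [List.mem_cons]
      rw [hdelta]
      generalize hd1def : (if t = "(" ∨ t = "[" ∨ t = "{" then depth + 1
        else if t = ")" ∨ t = "]" ∨ t = "}" then depth - 1 else depth) = d1
      have hd1closer : d1 < 0 → (t = ")" ∨ t = "]" ∨ t = "}") := by
        intro hneg
        by_contra hnc
        rw [← hd1def] at hneg
        split_ifs at hneg <;> omega
      simp only [takeStmt]
      by_cases hB : d1 < 0 ∨ (d1 = 0 ∧ breaksStatement tokens i (eq_idx + 1) t)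
      · rw [if_pos hB]
        simp only [List.any_nil, Bool.or_false]
        split_ifs with c1 c2 c3 c4
        · rfl
        · rfl
        · rfl
        · rfl
        · exfalso
          rcases hB with hneg | ⟨hz, hbs⟩
          · exact c1 ⟨hd1closer hneg, hneg⟩
          · rcases (breaksStatement_iff tokens i (eq_idx + 1) t).mp hbs with h | h | h
            · exact c2 ⟨hz, h⟩
            · exact c3 ⟨hz, h⟩
            · exact c4 ⟨hz, h⟩
      · rw [if_neg hB]
        push Not at hB
        have hd1nn : 0 ≤ d1 := hB.1
        rw [if_neg (fun h => absurd h.2 (not_lt.mpr hB.1)),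
            if_neg (fun h => hB.2 h.1 ((breaksStatement_iff tokens i (eq_idx + 1) t).mpr (Or.inl h.2))),
            if_neg (fun h => hB.2 h.1 ((breaksStatement_iff tokens i (eq_idx + 1) t).mpr (Or.inr (Or.inl h.2)))),
            if_neg (fun h => hB.2 h.1 ((breaksStatement_iff tokens i (eq_idx + 1) t).mpr (Or.inr (Or.inr h.2))))]
        rw [ih (i + 1) d1 _ _ (by omega) (by omega) hd1nn]
        have hjoin : isJoinCall tokens i t =
            (decide (t = "join" ∧ 0 < i ∧ PySem.List.pyGet? tokens (i - 1) = some "." ∧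
                i + 1 < (tokens.length : Int) ∧ PySem.List.pyGet? tokens (i + 1) = some "(") ||
             decide (t = "implode" ∧ i + 1 < (tokens.length : Int) ∧
                PySem.List.pyGet? tokens (i + 1) = some "(")) := by
          unfold isJoinCall
          by_cases hj1 : t = "join"
          · subst hj1; simp
          · by_cases hj2 : t = "implode" <;> simp [hj1, hj2]
        simp only [List.any_cons, hjoin]
        have hqm : (decide (t = "\"?\"") || decide (t = "'?'")) = decide (t = "\"?\"" ∨ t = "'?'") := by
          simp
        rw [← hqm]
        simp only [Bool.or_assoc]

-- ===== VERDICT (by name: the statement is the Claim_ definition above) =====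
theorem detect_safe_placeholder_list_py_spec : Claim_equal_detect_safe_placeholder_list_py := by
  intro tokens eq_idx _ hpre
  unfold Spec_detect_safe_placeholder_list_py
  unfold detect_safe_placeholder_list_py detect_safe_placeholder_list_py_alt
  by_cases hle : eq_idx + 1 ≤ (tokens.length : Int)
  · rw [pyA_go_eq tokens eq_idx _ (eq_idx + 1) 0 false false hpre (by omega) le_rfl]
    simp
  · have h0 : ((tokens.length : Int) - (eq_idx + 1)).toNat = 0 := by omega
    simp [h0, pyA_go, bracketDepths, takeStmt]
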